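-- pv_equiv track=rewrite | github.com/QianFuv/UpLang | src/uplang/sync.py | _calculate_en_translation_diff
-- ===== SOURCE A (Python) =====
-- def _calculate_en_translation_diff(
--     previous_translations: dict[str, str],
--     latest_translations: dict[str, str],
-- ) -> tuple[set[str], set[str], set[str]]:
--     """Calculate added, deleted, and changed key sets between two mappings.
--
--     Args:
--         previous_translations: Existing translation mapping.
--         latest_translations: Latest translation mapping.
--
--     Returns:
--         Tuple containing added, deleted, and changed key sets.
--     """
--
--     previous_keys = set(previous_translations.keys())
--     latest_keys = set(latest_translations.keys())
--
--     added_keys = latest_keys - previous_keys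
--     deleted_keys = previous_keys - latest_keys
--     changed_keys = {
--         key
--         for key in previous_keys & latest_keys
--         if previous_translations[key] != latest_translations[key]
--     }
--
--     return added_keys, deleted_keys, changed_keys
-- ===== SOURCE B (Python) =====
-- def _calculate_en_translation_diff(
--     previous_translations: dict[str, str],
--     latest_translations: dict[str, str],
-- ) -> tuple[set[str], set[str], set[str]]:
--     """Item-set algebra: compare (key, value) PAIRS, so no per-key value lookup is
--     ever performed.  A previous item missing from the latest items is 'stale'
--     (its key was deleted or changed); a latest item missing from the previous
--     items is 'fresh' (its key was added or changed).  changed = stale & fresh,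
--     deleted = stale keys absent from latest, added = fresh keys absent from previous."""
--     previous_items = set(previous_translations.items())
--     latest_items = set(latest_translations.items())
--     stale_keys = {key for key, _ in previous_items - latest_items}
--     fresh_keys = {key for key, _ in latest_items - previous_items}
--     added_keys = fresh_keys - previous_translations.keys()
--     deleted_keys = stale_keys - latest_translations.keys()
--     changed_keys = stale_keys & fresh_keys
--     return added_keys, deleted_keys, changed_keys
-- ===== Notes on version B (the rewrite author's own statement) =====
-- stated objective: alternative
-- what changed: Instead of A's key-set algebra (build two key sets, two key differences, intersect and filter by per-key value lookups), B diffs the (key,value) ITEM sets: stale = previous items absent from latest items, fresh = latest items absent from previous items; changed is the intersection of their key sets, deleted/added are stale/fresh keys absent from the other mapping — no value lookup is ever performed.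
import Mathlib
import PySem

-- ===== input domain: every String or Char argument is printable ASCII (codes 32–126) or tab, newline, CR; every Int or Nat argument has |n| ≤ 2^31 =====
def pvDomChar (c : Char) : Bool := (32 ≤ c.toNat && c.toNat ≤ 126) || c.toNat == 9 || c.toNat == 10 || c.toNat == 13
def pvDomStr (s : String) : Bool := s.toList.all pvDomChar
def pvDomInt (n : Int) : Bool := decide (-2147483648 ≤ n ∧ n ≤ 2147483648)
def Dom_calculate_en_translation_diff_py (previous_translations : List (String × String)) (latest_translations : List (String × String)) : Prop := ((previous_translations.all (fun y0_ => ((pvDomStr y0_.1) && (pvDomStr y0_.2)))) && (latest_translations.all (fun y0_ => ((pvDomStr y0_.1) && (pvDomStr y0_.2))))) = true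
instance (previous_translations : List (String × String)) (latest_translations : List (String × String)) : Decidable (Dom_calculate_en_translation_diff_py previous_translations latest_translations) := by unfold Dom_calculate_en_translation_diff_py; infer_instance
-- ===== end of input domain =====

-- B replaces A's key-set algebra (key sets, two differences, an intersection filtered by
-- per-key value lookups) with ITEM-set algebra: it diffs the (key, value) PAIR sets, so no
-- value lookup ever happens — changed = stale-keys ∩ fresh-keys (alternative algorithm,
-- same asymptotic cost); proved to return the same value on duplicate-key-free inputs.


-- dict[key] on an association list: value of the first matching pair (exact: a Python
-- dict has unique keys, so first match is the key's value)
def pvLookup (d : List (String × String)) (k : String) : Option String :=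
  (d.find? (fun p => p.1 == k)).map Prod.snd

-- ===== PORT A =====
def calculate_en_translation_diff_py (previous_translations : List (String × String)) (latest_translations : List (String × String)) : List String × List String × List String :=
  let previous_keys := PySem.Set.ofList (previous_translations.map Prod.fst)
  let latest_keys := PySem.Set.ofList (latest_translations.map Prod.fst)
  let added_keys := PySem.Set.diff latest_keys previous_keys
  let deleted_keys := PySem.Set.diff previous_keys latest_keys
  let changed_keys := PySem.Set.ofList ((PySem.Set.inter previous_keys latest_keys).filter
    (fun key => pvLookup previous_translations key != pvLookup latest_translations key))
  (added_keys, deleted_keys, changed_keys)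

-- ===== PORT B =====
-- set(d.items()) of an association list = set of its pairs; the key comprehensions over
-- the two item differences are key sets in first-occurrence order (the returned values
-- are Python sets, so no result depends on a set's iteration order).
def calculate_en_translation_diff_py_alt (previous_translations : List (String × String)) (latest_translations : List (String × String)) : List String × List String × List String :=
  let previous_items := PySem.Set.ofList previous_translations
  let latest_items := PySem.Set.ofList latest_translations
  let stale_keys := PySem.Set.ofList ((PySem.Set.diff previous_items latest_items).map Prod.fst)
  let fresh_keys := PySem.Set.ofList ((PySem.Set.diff latest_items previous_items).map Prod.fst)
  let added_keys := PySem.Set.diff fresh_keys (PySem.Set.ofList (previous_translations.map Prod.fst))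
  let deleted_keys := PySem.Set.diff stale_keys (PySem.Set.ofList (latest_translations.map Prod.fst))
  let changed_keys := PySem.Set.inter stale_keys fresh_keys
  (added_keys, deleted_keys, changed_keys)

-- ===== PRECONDITION & SPEC =====
-- Pre_ excludes association lists with duplicate keys: they are not the encoding of any
-- Python dict (dict keys are unique), so neither behaviour there corresponds to A.
def Pre_calculate_en_translation_diff_py (previous_translations : List (String × String)) (latest_translations : List (String × String)) : Prop :=
  (previous_translations.map Prod.fst).Nodup ∧ (latest_translations.map Prod.fst).Nodup
instance (previous_translations : List (String × String)) (latest_translations : List (String × String)) : Decidable (Pre_calculate_en_translation_diff_py previous_translations latest_translations) := by unfold Pre_calculate_en_translation_diff_py; infer_instance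

def pvWitness_calculate_en_translation_diff_py : (List (String × String)) × (List (String × String)) :=
  ([("a", "1"), ("b", "2"), ("c", "3")], [("b", "2"), ("c", "9"), ("d", "4")])

def Spec_calculate_en_translation_diff_py (previous_translations : List (String × String)) (latest_translations : List (String × String)) (out : List String × List String × List String) : Prop := out = calculate_en_translation_diff_py_alt previous_translations latest_translations
instance (previous_translations : List (String × String)) (latest_translations : List (String × String)) (out : List String × List String × List String) : Decidable (Spec_calculate_en_translation_diff_py previous_translations latest_translations out) := by unfold Spec_calculate_en_translation_diff_py; infer_instance

-- ===== CLAIM (what is proved, stated in full; the proofs are below) =====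
def Claim_equal_calculate_en_translation_diff_py : Prop := ∀ (previous_translations : List (String × String)) (latest_translations : List (String × String)), Dom_calculate_en_translation_diff_py previous_translations latest_translations → Pre_calculate_en_translation_diff_py previous_translations latest_translations → Spec_calculate_en_translation_diff_py previous_translations latest_translations (calculate_en_translation_diff_py previous_translations latest_translations)

-- ===== LEMMAS AND PROOFS =====

-- filtering keys = filtering pairs by the key predicate, then taking keys
lemma pv_filter_map_fst (l : List (String × String)) (c : String → Bool) :
    (l.map Prod.fst).filter c = (l.filter (fun p => c p.1)).map Prod.fst := by
  induction l with
  | nil => rfl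
  | cons p l ih =>
    by_cases hc : c p.1 = true
    · simp [hc, ih]
    · simp [hc, ih]

-- with unique keys, dict lookup of a present pair's key returns its value
lemma pv_lookup_of_mem (d : List (String × String)) (hd : (d.map Prod.fst).Nodup)
    (p : String × String) (hp : p ∈ d) : pvLookup d p.1 = some p.2 := by
  induction d with
  | nil => cases hp
  | cons a l ih =>
    rcases List.mem_cons.mp hp with h | h
    · subst h; simp [pvLookup]
    · have hne : a.1 ≠ p.1 := by
        intro he
        have : p.1 ∈ l.map Prod.fst := List.mem_map.mpr ⟨p, h, rfl⟩
        rw [← he] at this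
        exact (List.nodup_cons.mp (by simpa using hd)).1 this
      have : (a.1 == p.1) = false := by simp [hne]
      simpa [pvLookup, List.find?_cons, this] using
        ih (List.nodup_cons.mp (by simpa using hd)).2 h

lemma pv_key_not_mem (d : List (String × String)) (p : String × String)
    (hk : ((d.map Prod.fst).contains p.1) = false) : (d.contains p) = false := by
  rw [List.contains_eq_mem] at hk ⊢
  simp only [decide_eq_false_iff_not] at hk ⊢
  exact fun hm => hk (List.mem_map.mpr ⟨p, hm, rfl⟩)

-- pointwise classification for added / deleted: a pair whose key is absent from the other
-- mapping is automatically absent as a pair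
lemma pv_pt_absent (d : List (String × String)) (p : String × String) :
    ((!((d.map Prod.fst).contains p.1)) && !(d.contains p))
      = !((d.map Prod.fst).contains p.1) := by
  cases hk : ((d.map Prod.fst).contains p.1) with
  | false => rw [pv_key_not_mem d p hk]; rfl
  | true => simp

-- pointwise classification for changed
lemma pv_pt_changed (prev lat : List (String × String))
    (hp : (prev.map Prod.fst).Nodup) (hl : (lat.map Prod.fst).Nodup)
    (p : String × String) (hmem : p ∈ prev) :
    ((((lat.filter (fun q => !(prev.contains q))).map Prod.fst).contains p.1) &&
        (!(lat.contains p)))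
      = ((pvLookup prev p.1 != pvLookup lat p.1) && ((lat.map Prod.fst).contains p.1)) := by
  obtain ⟨k, v⟩ := p
  by_cases hk : k ∈ lat.map Prod.fst
  · rcases List.mem_map.mp hk with ⟨q, hq, hq1⟩
    subst hq1
    have hlookl : pvLookup lat q.1 = some q.2 := pv_lookup_of_mem lat hl (q.1, q.2) hq
    have hlookp : pvLookup prev q.1 = some v := pv_lookup_of_mem prev hp (q.1, v) hmem
    have hmemlat : (lat.contains (q.1, v)) = decide (v = q.2) := by
      rw [List.contains_eq_mem, decide_eq_decide]
      constructor
      · intro hm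
        exact Option.some.inj ((pv_lookup_of_mem lat hl (q.1, v) hm).symm.trans hlookl)
      · intro he; subst he; exact hq
    have hfresh : (((lat.filter (fun r => !(prev.contains r))).map Prod.fst).contains q.1)
        = decide (¬ v = q.2) := by
      rw [List.contains_eq_mem, decide_eq_decide]
      constructor
      · intro hm he
        rcases List.mem_map.mp hm with ⟨r, hr, hr1⟩
        obtain ⟨hrl, hrn⟩ := List.mem_filter.mp hr
        have hlr : pvLookup lat q.1 = some r.2 := hr1 ▸ pv_lookup_of_mem lat hl r hrl
        have hr2 : r.2 = q.2 := Option.some.inj (hlr.symm.trans hlookl)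
        have hrq : r = (q.1, v) := by
          cases r; cases hr1; cases hr2; cases he; rfl
        rw [List.contains_eq_mem] at hrn
        simp only [Bool.not_eq_eq_eq_not, Bool.not_true, decide_eq_false_iff_not] at hrn
        exact hrn (hrq ▸ hmem)
      · intro he
        refine List.mem_map.mpr ⟨(q.1, q.2), List.mem_filter.mpr ⟨hq, ?_⟩, rfl⟩
        rw [List.contains_eq_mem]
        simp only [Bool.not_eq_eq_eq_not, Bool.not_true, decide_eq_false_iff_not]
        intro hm'
        exact he (Option.some.inj
          (hlookp.symm.trans (pv_lookup_of_mem prev hp (q.1, q.2) hm')))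
    have hkb : ((lat.map Prod.fst).contains q.1) = true := by
      rw [List.contains_eq_mem]; simpa using hk
    simp only [hmemlat, hfresh, hlookp, hlookl, hkb]
    by_cases he : v = q.2 <;> simp [he]
  · have hkb : ((lat.map Prod.fst).contains k) = false := by
      rw [List.contains_eq_mem]; simpa using hk
    have hfb : (((lat.filter (fun q => !(prev.contains q))).map Prod.fst).contains k) = false := by
      rw [List.contains_eq_mem, decide_eq_false_iff_not]
      intro hm
      rcases List.mem_map.mp hm with ⟨r, hr, hr1⟩
      exact hk (List.mem_map.mpr ⟨r, (List.mem_filter.mp hr).1, hr1⟩)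
    simp only [hkb, hfb]
    simp

-- ===== VERDICT helper: the three components =====
theorem calculate_en_translation_diff_py_spec : Claim_equal_calculate_en_translation_diff_py := by
  intro prev lat _ hpre
  obtain ⟨hp, hl⟩ := hpre
  unfold Spec_calculate_en_translation_diff_py
  unfold calculate_en_translation_diff_py calculate_en_translation_diff_py_alt
  simp only
  have hprevN : prev.Nodup := List.Nodup.of_map _ hp
  have hlatN : lat.Nodup := List.Nodup.of_map _ hl
  have e1 : PySem.Set.ofList prev = prev := PySem.Set.ofList_eq_self_of_nodup _ hprevN
  have e2 : PySem.Set.ofList lat = lat := PySem.Set.ofList_eq_self_of_nodup _ hlatN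
  have e3 : PySem.Set.ofList (prev.map Prod.fst) = prev.map Prod.fst :=
    PySem.Set.ofList_eq_self_of_nodup _ hp
  have e4 : PySem.Set.ofList (lat.map Prod.fst) = lat.map Prod.fst :=
    PySem.Set.ofList_eq_self_of_nodup _ hl
  rw [e1, e2, e3, e4]
  unfold PySem.Set.diff PySem.Set.inter PySem.Set.contains
  -- stale / fresh key lists are duplicate-free, so their ofList is the identity
  have hstaleN : ((prev.filter (fun q => !(lat.contains q))).map Prod.fst).Nodup :=
    List.Nodup.sublist (List.Sublist.map _ List.filter_sublist) hp
  have hfreshN : ((lat.filter (fun q => !(prev.contains q))).map Prod.fst).Nodup :=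
    List.Nodup.sublist (List.Sublist.map _ List.filter_sublist) hl
  rw [PySem.Set.ofList_eq_self_of_nodup _ hstaleN, PySem.Set.ofList_eq_self_of_nodup _ hfreshN]
  refine Prod.ext ?hadd (Prod.ext ?hdel ?hchg)
  case hadd =>
    simp only
    rw [pv_filter_map_fst lat, pv_filter_map_fst (lat.filter _), List.filter_filter]
    congr 1
    refine (List.filter_congr ?_).symm
    intro q _
    exact pv_pt_absent prev q
  case hdel =>
    simp only
    rw [pv_filter_map_fst prev, pv_filter_map_fst (prev.filter _), List.filter_filter]
    congr 1
    refine (List.filter_congr ?_).symm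
    intro q _
    exact pv_pt_absent lat q
  case hchg =>
    simp only
    rw [List.filter_filter]
    have hcN : ((prev.map Prod.fst).filter
        (fun a => (pvLookup prev a != pvLookup lat a) &&
          ((lat.map Prod.fst).contains a))).Nodup := hp.filter _
    rw [PySem.Set.ofList_eq_self_of_nodup _ hcN]
    rw [pv_filter_map_fst prev, pv_filter_map_fst (prev.filter _), List.filter_filter]
    congr 1
    refine (List.filter_congr ?_)
    intro q hq
    exact (pv_pt_changed prev lat hp hl q hq).symm
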